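-- pv_equiv track=rewrite | github.com/hazelnutsgz/GoogleScholarAnalysis | citation_library.py | getGIndex
-- ===== SOURCE A (Python) =====
-- def getGIndex(cite):
-- 	gindex = 0
-- 	citation = 0
-- 	cnt = 0
-- 	while 1:
-- 		if cnt < len(cite):
-- 			citation = citation + int(cite[cnt])
-- 		cnt = cnt + 1
-- 		if cnt*cnt <= citation:
-- 			gindex = cnt
-- 		else:
-- 		 	break
-- 	return gindex
-- ===== SOURCE B (Python) =====
-- def _isqrt(n):
--     # binary search for floor(sqrt(n)), n >= 0; invariant lo**2 <= n < hi**2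
--     lo, hi = 0, n + 1
--     while hi - lo > 1:
--         mid = (lo + hi) // 2
--         if mid * mid <= n:
--             lo = mid
--         else:
--             hi = mid
--     return lo
--
-- def getGIndex(cite):
--     s = 0
--     k = 0
--     for c in cite:
--         k += 1
--         s += int(c)
--         if k * k > s:
--             return k - 1
--     return _isqrt(s)
-- ===== Notes on version B (the rewrite author's own statement) =====
-- stated objective: alternative
-- what changed: A's single while loop counts upward one step at a time past the end of the list until cnt^2 exceeds the running total; B scans the list once with a prefix sum, returns at the first failing prefix, and otherwise computes the answer as the integer square root of the total by binary search.
import Mathlib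
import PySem

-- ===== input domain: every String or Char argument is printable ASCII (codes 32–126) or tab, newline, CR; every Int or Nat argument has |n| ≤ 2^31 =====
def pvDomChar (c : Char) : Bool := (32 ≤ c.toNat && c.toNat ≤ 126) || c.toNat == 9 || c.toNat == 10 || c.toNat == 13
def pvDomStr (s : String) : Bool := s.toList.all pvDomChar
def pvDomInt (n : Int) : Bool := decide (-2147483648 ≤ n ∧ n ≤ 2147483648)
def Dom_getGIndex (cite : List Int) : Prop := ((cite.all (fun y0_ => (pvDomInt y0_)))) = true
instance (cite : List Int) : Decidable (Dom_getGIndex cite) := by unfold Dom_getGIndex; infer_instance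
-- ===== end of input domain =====

-- B replaces A's step-by-step upward count past the end of the list by a single
-- prefix-sum pass plus a binary-search integer square root of the total.

-- ===== PORT A =====

-- absolute-value sum of a list; used only to size the fuel guard of A's while loop
def pvAbsSum : List Int → Int
  | [] => 0
  | x :: xs => |x| + pvAbsSum xs

-- A's `while 1:` loop; gindex/citation/cnt are the loop variables (cnt stays ≥ 0, so Nat).
-- `fuel` is only a structural totality guard; the fuel supplied in `getGIndex` is proved
-- sufficient (the `0` branch is never reached there), so the loop is A's loop step for step.
def getGIndexLoop (cite : List Int) (gindex citation : Int) (cnt : Nat) : Nat → Int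
  | 0 => gindex
  | fuel + 1 =>
    if ((cnt : Int) + 1) * ((cnt : Int) + 1) ≤
        (if cnt < cite.length then citation + cite.getD cnt 0 else citation) then
      getGIndexLoop cite ((cnt : Int) + 1)
        (if cnt < cite.length then citation + cite.getD cnt 0 else citation) (cnt + 1) fuel
    else gindex

def getGIndex (cite : List Int) : Int :=
  getGIndexLoop cite 0 0 0 ((pvAbsSum cite).toNat + 2)

-- ===== PORT B =====

-- Source B's `_isqrt`: binary search with invariant lo^2 ≤ n < hi^2; `fuel` is again only a
-- structural totality guard, sufficient for the value (n+1).toNat supplied in `pvIsqrt`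
def pvIsqrtLoop (n lo hi : Int) : Nat → Int
  | 0 => lo
  | fuel + 1 =>
    if hi - lo > 1 then
      if PySem.Int.floordiv (lo + hi) 2 * PySem.Int.floordiv (lo + hi) 2 ≤ n then
        pvIsqrtLoop n (PySem.Int.floordiv (lo + hi) 2) hi fuel
      else
        pvIsqrtLoop n lo (PySem.Int.floordiv (lo + hi) 2) fuel
    else lo

def pvIsqrt (n : Int) : Int := pvIsqrtLoop n 0 (n + 1) (n + 1).toNat

-- Source B's for-loop over the list, carrying k and the prefix sum s
def getGIndexAltLoop : List Int → Int → Int → Int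
  | [], _, s => pvIsqrt s
  | c :: rest, k, s =>
    let k' := k + 1
    let s' := s + c
    if k' * k' > s' then k' - 1 else getGIndexAltLoop rest k' s'

def getGIndex_alt (cite : List Int) : Int := getGIndexAltLoop cite 0 0

-- ===== PRECONDITION & SPEC =====
def Spec_getGIndex (cite : List Int) (out : Int) : Prop := out = getGIndex_alt cite
instance (cite : List Int) (out : Int) : Decidable (Spec_getGIndex cite out) := by unfold Spec_getGIndex; infer_instance

-- ===== CLAIM (what is proved, stated in full; the proofs are below) =====
def Claim_equal_getGIndex : Prop := ∀ (cite : List Int), Dom_getGIndex cite → Spec_getGIndex cite (getGIndex cite)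

-- ===== LEMMAS AND PROOFS =====

theorem pvAbsSum_nonneg : ∀ (l : List Int), 0 ≤ pvAbsSum l
  | [] => le_refl 0
  | x :: xs => by simpa [pvAbsSum] using add_nonneg (abs_nonneg x) (pvAbsSum_nonneg xs)

-- characterization of the integer square root: r = floor(sqrt n)
def IsISqrt (n r : Int) : Prop := 0 ≤ r ∧ r * r ≤ n ∧ n < (r + 1) * (r + 1)

theorem isISqrt_unique {n a b : Int} (ha : IsISqrt n a) (hb : IsISqrt n b) : a = b := by
  obtain ⟨ha0, ha1, ha2⟩ := ha
  obtain ⟨hb0, hb1, hb2⟩ := hb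
  nlinarith

theorem pvIsqrtLoop_spec (n : Int) : ∀ (fuel : Nat) (lo hi : Int), 0 ≤ lo → lo * lo ≤ n →
    n < hi * hi → lo < hi → (hi - lo).toNat ≤ fuel → IsISqrt n (pvIsqrtLoop n lo hi fuel) := by
  intro fuel
  induction fuel with
  | zero => intro lo hi _ _ _ h3 hf; omega
  | succ fuel ih =>
    intro lo hi h0 h1 h2 h3 hf
    rw [pvIsqrtLoop]
    split
    · rename_i hgt
      have hed : PySem.Int.floordiv (lo + hi) 2 = (lo + hi) / 2 :=
        PySem.Int.floordiv_eq_ediv_of_pos (by norm_num)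
      have hmid1 : lo + 1 ≤ PySem.Int.floordiv (lo + hi) 2 := by omega
      have hmid2 : PySem.Int.floordiv (lo + hi) 2 ≤ hi - 1 := by omega
      split
      · exact ih _ hi (by omega) (by assumption) h2 (by omega) (by omega)
      · exact ih lo _ h0 h1 (by omega) (by omega) (by omega)
    · rename_i hle
      have hhi : hi = lo + 1 := by omega
      subst hhi
      exact ⟨h0, h1, h2⟩

theorem pvIsqrt_spec (n : Int) (hn : 0 ≤ n) : IsISqrt n (pvIsqrt n) := by
  unfold pvIsqrt
  exact pvIsqrtLoop_spec n (n + 1).toNat 0 (n + 1) le_rfl (by simpa) (by nlinarith) (by omega) (by omega)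

-- Phase 2 of A's loop (cnt past the end of the list): it computes an integer square root
theorem getGIndexLoop_phase2 (cite : List Int) : ∀ (fuel : Nat) (citation : Int) (cnt : Nat),
    cite.length ≤ cnt → (cnt : Int) * (cnt : Int) ≤ citation →
    (citation + 1 - (cnt : Int)).toNat < fuel →
    IsISqrt citation (getGIndexLoop cite (cnt : Int) citation cnt fuel) := by
  intro fuel
  induction fuel with
  | zero => intro citation cnt _ _ hf; omega
  | succ fuel ih =>
    intro citation cnt hlen hsq hf
    rw [getGIndexLoop]
    have hnotlt : ¬ cnt < cite.length := by omega
    rw [if_neg hnotlt]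
    split
    · rename_i h
      have hone : (1 : Int) ≤ (cnt : Int) + 1 := by omega
      have hsq2 : ((cnt : Int) + 1) ≤ ((cnt : Int) + 1) * ((cnt : Int) + 1) :=
        le_mul_of_one_le_left (by omega) hone
      have := ih citation (cnt + 1) (by omega) (by push_cast; linarith) (by push_cast; omega)
      simpa using this
    · rename_i h
      refine ⟨by omega, hsq, ?_⟩
      linarith

-- Main phase alignment: A's loop agrees with B's list scan (given enough fuel)
theorem loop_align (cite : List Int) : ∀ (l : List Int) (cnt : Nat) (citation : Int) (fuel : Nat),
    cite.drop cnt = l → (cnt : Int) * (cnt : Int) ≤ citation →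
    (citation + pvAbsSum (cite.drop cnt) + 1 - (cnt : Int)).toNat < fuel →
    getGIndexLoop cite (cnt : Int) citation cnt fuel = getGIndexAltLoop l (cnt : Int) citation := by
  intro l
  induction l with
  | nil =>
    intro cnt citation fuel hdrop hsq hf
    have hlen : cite.length ≤ cnt := by
      have := congrArg List.length hdrop
      simp [List.length_drop] at this
      omega
    rw [hdrop] at hf
    have hA := getGIndexLoop_phase2 cite fuel citation cnt hlen hsq (by simpa [pvAbsSum] using hf)
    have h0 : (0 : Int) ≤ citation := le_trans (by positivity) hsq
    have hB := pvIsqrt_spec citation h0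
    simpa [getGIndexAltLoop] using isISqrt_unique hA hB
  | cons c rest ih =>
    intro cnt citation fuel hdrop hsq hf
    have hlt : cnt < cite.length := by
      by_contra hc
      rw [List.drop_eq_nil_of_le (by omega)] at hdrop
      exact absurd hdrop (by simp)
    have h1 := List.drop_eq_getElem_cons (l := cite) hlt
    rw [hdrop] at h1
    injection h1 with hc' hr'
    have hget : cite.getD cnt 0 = c := by
      rw [List.getD_eq_getElem cite 0 hlt, ← hc']
    have hrest : cite.drop (cnt + 1) = rest := hr'.symm
    have habs : pvAbsSum (cite.drop cnt) = |c| + pvAbsSum rest := by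
      rw [hdrop]; rfl
    have habs2 : c ≤ |c| := le_abs_self _
    have hrnn : 0 ≤ pvAbsSum rest := pvAbsSum_nonneg _
    cases fuel with
    | zero => omega
    | succ fuel =>
      rw [getGIndexLoop]
      rw [if_pos hlt, hget]
      simp only [getGIndexAltLoop]
      by_cases hcond : ((cnt : Int) + 1) * ((cnt : Int) + 1) ≤ citation + c
      · rw [if_pos hcond, if_neg (by omega)]
        have hone : (1 : Int) ≤ (cnt : Int) + 1 := by omega
        have hsq2 : ((cnt : Int) + 1) ≤ ((cnt : Int) + 1) * ((cnt : Int) + 1) :=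
          le_mul_of_one_le_left (by omega) hone
        have := ih (cnt + 1) (citation + c) fuel (by rw [hrest]) (by push_cast; linarith)
          (by rw [hrest]; push_cast; omega)
        simpa using this
      · rw [if_neg hcond, if_pos (by omega)]
        ring

-- ===== VERDICT (by name: the statement is the Claim_ definition above) =====
theorem getGIndex_spec : Claim_equal_getGIndex := by
  intro cite _
  unfold Spec_getGIndex getGIndex getGIndex_alt
  have h0 : 0 ≤ pvAbsSum cite := pvAbsSum_nonneg cite
  exact loop_align cite cite 0 0 ((pvAbsSum cite).toNat + 2) rfl (by norm_num) (by simp; omega)
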